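-- pv_equiv track=rewrite | github.com/CroodSolutions/BeaconatorC2 | ui/components/metasploit_widget.py | get_formats_for_payload
-- ===== SOURCE A (Python) =====
-- def get_formats_for_payload(payload_name: str) -> list:
--     """Get appropriate formats based on payload platform/type"""
--     if not payload_name:
--         return ["exe", "raw", "hex"]
--
--     payload_lower = payload_name.lower()
--
--     # Windows payloads
--     if any(platform in payload_lower for platform in ['windows', 'win']):
--         return ["exe", "dll", "msi", "raw", "hex", "powershell"]
--
--     # Linux payloads
--     elif any(platform in payload_lower for platform in ['linux', 'unix']):
--         return ["elf", "raw", "hex"]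
--
--     # Python payloads
--     elif 'python' in payload_lower:
--         return ["py", "raw"]
--
--     # PHP payloads
--     elif 'php' in payload_lower:
--         return ["raw"]
--
--     # Java payloads
--     elif 'java' in payload_lower:
--         return ["jar", "war", "raw"]
--
--     # Android payloads
--     elif 'android' in payload_lower:
--         return ["apk", "raw"]
--
--     # macOS payloads
--     elif any(platform in payload_lower for platform in ['osx', 'macos']):
--         return ["macho", "raw", "hex"]
--
--     # Generic/multi-platform payloads
--     else:
--         return ["raw", "hex", "exe"]
-- ===== SOURCE B (Python) =====
-- KEYWORD_RULE = {
--     'windows': 0, 'win': 0,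
--     'linux': 1, 'unix': 1,
--     'python': 2,
--     'php': 3,
--     'java': 4,
--     'android': 5,
--     'osx': 6, 'macos': 6,
-- }
--
-- FORMATS = [
--     ["exe", "dll", "msi", "raw", "hex", "powershell"],
--     ["elf", "raw", "hex"],
--     ["py", "raw"],
--     ["raw"],
--     ["jar", "war", "raw"],
--     ["apk", "raw"],
--     ["macho", "raw", "hex"],
--     ["raw", "hex", "exe"],
-- ]
--
-- def get_formats_for_payload(payload_name: str) -> list:
--     """Get appropriate formats based on payload platform/type"""
--     if not payload_name:
--         return ["exe", "raw", "hex"]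
--     s = payload_name.lower()
--     best = len(FORMATS) - 1
--     for i in range(len(s)):
--         for kw, r in KEYWORD_RULE.items():
--             if r < best and s.startswith(kw, i):
--                 best = r
--     return FORMATS[best]
-- ===== Notes on version B (the rewrite author's own statement) =====
-- stated objective: alternative
-- what changed: Instead of A's per-rule chain of whole-string substring tests, B does one left-to-right scan over the lowered name's positions, matching all keywords of a keyword->rule table at each position and keeping the minimum rule index, then indexes a format table with it.
import Mathlib
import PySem

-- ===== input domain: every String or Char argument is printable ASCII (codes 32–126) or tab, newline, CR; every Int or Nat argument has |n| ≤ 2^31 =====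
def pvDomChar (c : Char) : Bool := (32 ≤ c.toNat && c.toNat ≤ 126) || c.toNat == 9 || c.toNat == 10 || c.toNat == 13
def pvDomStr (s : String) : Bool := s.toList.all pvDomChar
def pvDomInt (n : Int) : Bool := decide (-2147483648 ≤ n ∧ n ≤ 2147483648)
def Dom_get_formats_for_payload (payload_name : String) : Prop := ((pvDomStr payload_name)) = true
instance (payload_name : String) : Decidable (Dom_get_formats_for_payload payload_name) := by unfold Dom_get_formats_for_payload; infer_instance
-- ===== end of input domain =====

-- B replaces A's per-rule substring chain by a single left-to-right scan over the string's positions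
-- with a keyword table and a min-priority accumulator; objective: alternative (same cost, different algorithm).


-- ===== PORT A =====
def get_formats_for_payload (payload_name : String) : List String :=
  if payload_name.toList = [] then ["exe", "raw", "hex"]
  else
    let payload_lower := PySem.Str.lower payload_name
    if (["windows", "win"] : List String).any (fun p => PySem.Str.isIn p payload_lower) then
      ["exe", "dll", "msi", "raw", "hex", "powershell"]
    else if (["linux", "unix"] : List String).any (fun p => PySem.Str.isIn p payload_lower) then
      ["elf", "raw", "hex"]
    else if PySem.Str.isIn "python" payload_lower then ["py", "raw"]
    else if PySem.Str.isIn "php" payload_lower then ["raw"]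
    else if PySem.Str.isIn "java" payload_lower then ["jar", "war", "raw"]
    else if PySem.Str.isIn "android" payload_lower then ["apk", "raw"]
    else if (["osx", "macos"] : List String).any (fun p => PySem.Str.isIn p payload_lower) then
      ["macho", "raw", "hex"]
    else ["raw", "hex", "exe"]

-- ===== PORT B =====
-- KEYWORD_RULE.items() in insertion order: keyword ↦ rule index
def pvKeys : List (List Char × Nat) :=
  [("windows".toList, 0), ("win".toList, 0),
   ("linux".toList, 1), ("unix".toList, 1),
   ("python".toList, 2),
   ("php".toList, 3),
   ("java".toList, 4),
   ("android".toList, 5),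
   ("osx".toList, 6), ("macos".toList, 6)]

def pvFormats : List (List String) :=
  [["exe", "dll", "msi", "raw", "hex", "powershell"],
   ["elf", "raw", "hex"],
   ["py", "raw"],
   ["raw"],
   ["jar", "war", "raw"],
   ["apk", "raw"],
   ["macho", "raw", "hex"],
   ["raw", "hex", "exe"]]

-- the scan over positions i = 0, 1, …: at each position try every keyword (s.startswith(kw, i)
-- is kw.isPrefixOf (the suffix at i)) and keep the smallest rule index seen
def pvScan : List Char → Nat → Nat
  | [], best => best
  | c :: rest, best =>
      pvScan rest
        (pvKeys.foldl (fun b p => if p.2 < b ∧ p.1.isPrefixOf (c :: rest) then p.2 else b) best)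

def get_formats_for_payload_alt (payload_name : String) : List String :=
  if payload_name.toList = [] then ["exe", "raw", "hex"]
  else
    pvFormats.getD (pvScan (PySem.Str.lower payload_name).toList (pvFormats.length - 1)) []

-- ===== PRECONDITION & SPEC =====
def Spec_get_formats_for_payload (payload_name : String) (out : List String) : Prop := out = get_formats_for_payload_alt payload_name
instance (payload_name : String) (out : List String) : Decidable (Spec_get_formats_for_payload payload_name out) := by unfold Spec_get_formats_for_payload; infer_instance

-- ===== CLAIM (what is proved, stated in full; the proofs are below) =====
def Claim_equal_get_formats_for_payload : Prop := ∀ (payload_name : String), Dom_get_formats_for_payload payload_name → Spec_get_formats_for_payload payload_name (get_formats_for_payload payload_name)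

-- ===== LEMMAS AND PROOFS =====

-- min-fold over a key table: the smallest rule index whose keyword is a prefix of t (starting from a)
def pvFmin (t : List Char) (a : Nat) (L : List (List Char × Nat)) : Nat :=
  L.foldl (fun b p => if p.1.isPrefixOf t then min b p.2 else b) a

-- smallest rule index whose keyword starts at some position of cs (7 if none)
def pvM : List Char → Nat
  | [] => 7
  | c :: rest => min (pvFmin (c :: rest) 7 pvKeys) (pvM rest)

lemma pvFmin_cons (t : List Char) (a : Nat) (q : List Char × Nat) (L : List (List Char × Nat)) :
    pvFmin t a (q :: L) = pvFmin t (if q.1.isPrefixOf t then min a q.2 else a) L := rfl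

lemma pvFmin_le (t : List Char) (L : List (List Char × Nat)) :
    ∀ a, pvFmin t a L ≤ a := by
  induction L with
  | nil => intro a; simp [pvFmin]
  | cons q L ih =>
    intro a
    rw [pvFmin_cons]
    by_cases hq : q.1.isPrefixOf t = true <;> simp only [hq, Bool.false_eq_true, if_true, if_false]
    · exact le_trans (ih _) (Nat.min_le_left a q.2)
    · exact ih a

lemma pvFmin_init (t : List Char) (L : List (List Char × Nat)) (h : ∀ p ∈ L, p.2 ≤ 7) :
    ∀ a, a ≤ 7 → pvFmin t a L = min a (pvFmin t 7 L) := by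
  induction L with
  | nil => intro a ha; simp [pvFmin]; omega
  | cons q L ih =>
    intro a ha
    have hq7 : q.2 ≤ 7 := h q (by simp)
    have h' : ∀ p ∈ L, p.2 ≤ 7 := fun p hp => h p (by simp [hp])
    rw [pvFmin_cons, pvFmin_cons]
    by_cases hq : q.1.isPrefixOf t = true <;> simp only [hq, Bool.false_eq_true, if_true, if_false]
    · rw [ih h' (min a q.2) (by omega), ih h' (min 7 q.2) (by omega)]; omega
    · rw [ih h' a ha]

lemma pvInner_eq (t : List Char) (L : List (List Char × Nat)) (h : ∀ p ∈ L, p.2 ≤ 7) :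
    ∀ a, a ≤ 7 →
      L.foldl (fun b p => if p.2 < b ∧ p.1.isPrefixOf t then p.2 else b) a
        = min a (pvFmin t 7 L) := by
  induction L with
  | nil => intro a ha; simp [pvFmin]; omega
  | cons q L ih =>
    intro a ha
    have hq7 : q.2 ≤ 7 := h q (by simp)
    have h' : ∀ p ∈ L, p.2 ≤ 7 := fun p hp => h p (by simp [hp])
    rw [List.foldl_cons]
    have hstep : (if q.2 < a ∧ q.1.isPrefixOf t then q.2 else a)
        = if q.1.isPrefixOf t then min a q.2 else a := by
      by_cases hq : q.1.isPrefixOf t = true <;> by_cases hlt : q.2 < a <;>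
        simp [hq, hlt] <;> omega
    rw [hstep, pvFmin_cons]
    by_cases hq : q.1.isPrefixOf t = true <;> simp only [hq, Bool.false_eq_true, if_true, if_false]
    · rw [ih h' (min a q.2) (by omega), pvFmin_init t L h' (min 7 q.2) (by omega)]; omega
    · exact ih h' a ha

lemma pvKeys_le : ∀ p ∈ pvKeys, p.2 ≤ 7 := by decide

lemma pvScan_eq (cs : List Char) : ∀ a, a ≤ 7 → pvScan cs a = min a (pvM cs) := by
  induction cs with
  | nil => intro a ha; simp [pvScan, pvM]; omega
  | cons c rest ih =>
    intro a ha
    show pvScan rest _ = _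
    rw [pvInner_eq (c :: rest) pvKeys pvKeys_le a ha]
    have hF := pvFmin_le (c :: rest) pvKeys 7
    rw [ih (min a (pvFmin (c :: rest) 7 pvKeys)) (by omega)]
    show _ = min a (min (pvFmin (c :: rest) 7 pvKeys) (pvM rest))
    omega

lemma pvFmin_le_of_mem (t : List Char) (L : List (List Char × Nat)) (p : List Char × Nat)
    (hp : p ∈ L) (hpfx : p.1.isPrefixOf t = true) : ∀ a, pvFmin t a L ≤ p.2 := by
  induction L with
  | nil => cases hp
  | cons q L ih =>
    intro a
    rw [pvFmin_cons]
    rcases List.mem_cons.mp hp with rfl | hp'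
    · simp only [hpfx, if_true]
      exact le_trans (pvFmin_le t L _) (Nat.min_le_right a p.2)
    · by_cases hq : q.1.isPrefixOf t = true <;> simp only [hq, Bool.false_eq_true, if_true, if_false] <;>
        exact ih hp' _

lemma pvFmin_cases (t : List Char) (L : List (List Char × Nat)) :
    ∀ a, pvFmin t a L = a ∨ ∃ p ∈ L, p.1.isPrefixOf t = true ∧ pvFmin t a L = p.2 := by
  induction L with
  | nil => intro a; left; simp [pvFmin]
  | cons q L ih =>
    intro a
    rw [pvFmin_cons]
    by_cases hq : q.1.isPrefixOf t = true <;> simp only [hq, Bool.false_eq_true, if_true, if_false]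
    · rcases ih (min a q.2) with h | ⟨p, hp, hpfx, hval⟩
      · by_cases hle : a ≤ q.2
        · left; rw [h]; omega
        · right; exact ⟨q, by simp, hq, by rw [h]; omega⟩
      · right; exact ⟨p, List.mem_cons_of_mem q hp, hpfx, hval⟩
    · rcases ih a with h | ⟨p, hp, hpfx, hval⟩
      · left; exact h
      · right; exact ⟨p, List.mem_cons_of_mem q hp, hpfx, hval⟩

lemma pvM_le_seven (cs : List Char) : pvM cs ≤ 7 := by
  induction cs with
  | nil => simp [pvM]
  | cons c rest ih => simp only [pvM]; omega

lemma pvM_le_of_infix (p : List Char × Nat) (hp : p ∈ pvKeys) :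
    ∀ cs : List Char, p.1 <:+: cs → pvM cs ≤ p.2 := by
  intro cs
  induction cs with
  | nil =>
    intro hinf
    rcases List.infix_iff_prefix_suffix.mp hinf with ⟨t, hpre, hsuf⟩
    have ht : t = [] := List.suffix_nil.mp hsuf
    subst ht
    have hpnil : p.1 = [] := List.prefix_nil.mp hpre
    have hne : ∀ q ∈ pvKeys, q.1 ≠ ([] : List Char) := by decide
    exact absurd hpnil (hne p hp)
  | cons c rest ih =>
    intro hinf
    rcases List.infix_iff_prefix_suffix.mp hinf with ⟨t, hpre, hsuf⟩
    rcases List.suffix_cons_iff.mp hsuf with rfl | hsuf2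
    · have hpfx : p.1.isPrefixOf (c :: rest) = true := List.isPrefixOf_iff_prefix.mpr hpre
      calc pvM (c :: rest) ≤ pvFmin (c :: rest) 7 pvKeys := by simp only [pvM]; omega
        _ ≤ p.2 := pvFmin_le_of_mem _ _ p hp hpfx 7
    · have hinf2 : p.1 <:+: rest := List.infix_iff_prefix_suffix.mpr ⟨t, hpre, hsuf2⟩
      calc pvM (c :: rest) ≤ pvM rest := by simp only [pvM]; omega
        _ ≤ p.2 := ih hinf2

lemma pvM_cases (cs : List Char) :
    pvM cs = 7 ∨ ∃ p ∈ pvKeys, p.1 <:+: cs ∧ pvM cs = p.2 := by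
  induction cs with
  | nil => left; simp [pvM]
  | cons c rest ih =>
    have hsplit : pvM (c :: rest) = pvFmin (c :: rest) 7 pvKeys ∨
        pvM (c :: rest) = pvM rest := by simp only [pvM]; omega
    rcases hsplit with hcase | hcase
    · rcases pvFmin_cases (c :: rest) pvKeys 7 with hF | ⟨p, hp, hpfx, hF⟩
      · left; rw [hcase, hF]
      · right
        exact ⟨p, hp, (List.isPrefixOf_iff_prefix.mp hpfx).isInfix, by rw [hcase, hF]⟩
    · rcases ih with h7 | ⟨p, hp, hinf, hval⟩
      · left; rw [hcase, h7]
      · right; exact ⟨p, hp, List.infix_cons hinf, by rw [hcase, hval]⟩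

-- pvM computed against the same substring tests A performs, in A's priority order
lemma pvM_char (ls : List Char) :
    pvM ls =
      (if "windows".toList <:+: ls ∨ "win".toList <:+: ls then 0
       else if "linux".toList <:+: ls ∨ "unix".toList <:+: ls then 1
       else if "python".toList <:+: ls then 2
       else if "php".toList <:+: ls then 3
       else if "java".toList <:+: ls then 4
       else if "android".toList <:+: ls then 5
       else if "osx".toList <:+: ls ∨ "macos".toList <:+: ls then 6
       else 7) := by
  have hle7 := pvM_le_seven ls
  have hcases := pvM_cases ls
  have hub : ∀ p ∈ pvKeys, p.1 <:+: ls → pvM ls ≤ p.2 := fun p hp h => pvM_le_of_infix p hp ls h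
  split_ifs with h0 h1 h2 h3 h4 h5 h6
  · have hub' : pvM ls ≤ 0 := by
      rcases h0 with h | h
      · exact hub ("windows".toList, 0) (by simp [pvKeys]) h
      · exact hub ("win".toList, 0) (by simp [pvKeys]) h
    refine Nat.le_antisymm hub' ?_
    rcases hcases with h7 | ⟨p, hp, hinf, hval⟩
    · omega
    · simp only [pvKeys, List.mem_cons, List.not_mem_nil, or_false] at hp
      rcases hp with rfl | rfl | rfl | rfl | rfl | rfl | rfl | rfl | rfl | rfl <;>
        (try simp_all) <;> omega
  · have hub' : pvM ls ≤ 1 := by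
      rcases h1 with h | h
      · exact hub ("linux".toList, 1) (by simp [pvKeys]) h
      · exact hub ("unix".toList, 1) (by simp [pvKeys]) h
    refine Nat.le_antisymm hub' ?_
    rcases hcases with h7 | ⟨p, hp, hinf, hval⟩
    · omega
    · simp only [pvKeys, List.mem_cons, List.not_mem_nil, or_false] at hp
      rcases hp with rfl | rfl | rfl | rfl | rfl | rfl | rfl | rfl | rfl | rfl <;>
        (try simp_all) <;> omega
  · have hub' : pvM ls ≤ 2 := by
      exact hub ("python".toList, 2) (by simp [pvKeys]) h2
    refine Nat.le_antisymm hub' ?_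
    rcases hcases with h7 | ⟨p, hp, hinf, hval⟩
    · omega
    · simp only [pvKeys, List.mem_cons, List.not_mem_nil, or_false] at hp
      rcases hp with rfl | rfl | rfl | rfl | rfl | rfl | rfl | rfl | rfl | rfl <;>
        (try simp_all) <;> omega
  · have hub' : pvM ls ≤ 3 := by
      exact hub ("php".toList, 3) (by simp [pvKeys]) h3
    refine Nat.le_antisymm hub' ?_
    rcases hcases with h7 | ⟨p, hp, hinf, hval⟩
    · omega
    · simp only [pvKeys, List.mem_cons, List.not_mem_nil, or_false] at hp
      rcases hp with rfl | rfl | rfl | rfl | rfl | rfl | rfl | rfl | rfl | rfl <;>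
        (try simp_all) <;> omega
  · have hub' : pvM ls ≤ 4 := by
      exact hub ("java".toList, 4) (by simp [pvKeys]) h4
    refine Nat.le_antisymm hub' ?_
    rcases hcases with h7 | ⟨p, hp, hinf, hval⟩
    · omega
    · simp only [pvKeys, List.mem_cons, List.not_mem_nil, or_false] at hp
      rcases hp with rfl | rfl | rfl | rfl | rfl | rfl | rfl | rfl | rfl | rfl <;>
        (try simp_all) <;> omega
  · have hub' : pvM ls ≤ 5 := by
      exact hub ("android".toList, 5) (by simp [pvKeys]) h5
    refine Nat.le_antisymm hub' ?_
    rcases hcases with h7 | ⟨p, hp, hinf, hval⟩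
    · omega
    · simp only [pvKeys, List.mem_cons, List.not_mem_nil, or_false] at hp
      rcases hp with rfl | rfl | rfl | rfl | rfl | rfl | rfl | rfl | rfl | rfl <;>
        (try simp_all) <;> omega
  · have hub' : pvM ls ≤ 6 := by
      rcases h6 with h | h
      · exact hub ("osx".toList, 6) (by simp [pvKeys]) h
      · exact hub ("macos".toList, 6) (by simp [pvKeys]) h
    refine Nat.le_antisymm hub' ?_
    rcases hcases with h7 | ⟨p, hp, hinf, hval⟩
    · omega
    · simp only [pvKeys, List.mem_cons, List.not_mem_nil, or_false] at hp
      rcases hp with rfl | rfl | rfl | rfl | rfl | rfl | rfl | rfl | rfl | rfl <;>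
        (try simp_all) <;> omega
  · rcases hcases with h7 | ⟨p, hp, hinf, hval⟩
    · exact h7
    · simp only [pvKeys, List.mem_cons, List.not_mem_nil, or_false] at hp
      rcases hp with rfl | rfl | rfl | rfl | rfl | rfl | rfl | rfl | rfl | rfl <;> simp_all

-- ===== VERDICT (by name: the statement is the Claim_ definition above) =====
theorem get_formats_for_payload_spec : Claim_equal_get_formats_for_payload := by
  intro payload_name _
  unfold Spec_get_formats_for_payload get_formats_for_payload get_formats_for_payload_alt
  by_cases hs : payload_name.toList = []
  · simp [hs]
  · simp only [hs, if_false]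
    have hscan : pvScan (PySem.Str.lower payload_name).toList (pvFormats.length - 1)
        = pvM (PySem.Str.lower payload_name).toList := by
      have := pvScan_eq (PySem.Str.lower payload_name).toList 7 (by omega)
      have h7 := pvM_le_seven (PySem.Str.lower payload_name).toList
      simp only [pvFormats, List.length_cons, List.length_nil]
      rw [this]; omega
    rw [hscan, pvM_char]
    simp only [List.any_cons, List.any_nil, Bool.or_false, Bool.or_eq_true,
      PySem.Str.isIn_iff_infix]
    split_ifs <;> rfl
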